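-- pv_equiv track=rewrite | github.com/fabioantonioastore/Symbolic-Logic-Evaluator | evaluator.py | truth_table_rows
-- ===== SOURCE A (Python) =====
-- def get_variables_letters(statement: str) -> set[str]:
--     letters = set()
--     for i in range(ord("A"), ord("Z")):
--         if i == ord("V"):
--             continue
--         if chr(i) in statement:
--             letters.add(chr(i))
--     return letters
--
-- def truth_table_rows(statement: str) -> list[list[str]]:
--     variables = get_variables_letters(statement)
--     total_variables = len(variables)
--     total_rows = 2**total_variables
--     variable_row = [variable for variable in sorted(variables)]
--     rows = []
--     for _ in range(total_rows):
--         rows.append([])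
--     for i in range(1, total_variables + 1):
--         parts = 2**i
--         part_len = total_rows // parts
--         switch = False
--         index = 0
--         for j in range(parts):
--             for _ in range(part_len):
--                 if switch:
--                     rows[index].append("F")
--                 else:
--                     rows[index].append("T")
--                 index += 1
--             switch = not switch
--     rows.insert(0, variable_row)
--     return rows
-- ===== SOURCE B (Python) =====
-- def get_variables_letters(statement: str) -> set[str]:
--     letters = set()
--     for i in range(ord("A"), ord("Z")):
--         if i == ord("V"):
--             continue
--         if chr(i) in statement:
--             letters.add(chr(i))
--     return letters
--
-- def truth_table_rows(statement: str) -> list[list[str]]: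
--     variables = get_variables_letters(statement)
--     n = len(variables)
--     variable_row = sorted(variables)
--     rows = [variable_row]
--     for r in range(2 ** n):
--         rows.append(["T" if (r // 2 ** (n - 1 - k)) % 2 == 0 else "F" for k in range(n)])
--     return rows
-- ===== Notes on version B (the rewrite author's own statement) =====
-- stated objective: alternative
-- what changed: The per-column block fill (outer loop over columns, inner loops over alternating T/F blocks, mutating rows in place) is replaced by a single row-major pass that reads each variable's value directly off the binary digits of the row index (row r, column k is 'T' iff bit n-1-k of r is 0).
import Mathlib
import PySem

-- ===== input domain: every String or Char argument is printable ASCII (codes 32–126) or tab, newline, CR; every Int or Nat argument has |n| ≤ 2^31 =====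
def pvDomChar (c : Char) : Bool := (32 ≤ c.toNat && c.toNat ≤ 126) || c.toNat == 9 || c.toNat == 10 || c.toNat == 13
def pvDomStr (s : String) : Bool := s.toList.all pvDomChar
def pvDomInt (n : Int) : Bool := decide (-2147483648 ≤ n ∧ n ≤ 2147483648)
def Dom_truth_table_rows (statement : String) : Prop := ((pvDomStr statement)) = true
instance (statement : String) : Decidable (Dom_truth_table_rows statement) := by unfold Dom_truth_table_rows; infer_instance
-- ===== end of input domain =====

-- B replaces A's per-column alternating-block fill of the table by a single row-major pass that
-- reads each variable's value off the binary digits of the row index; same variable extraction.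

-- ===== PORT A =====

-- chr(i); exact for the non-negative code points used here
def chrStr (i : Int) : String := String.singleton (Char.ofNat i.toNat)

-- loop over ord("A")=65 .. ord("Z")-1=89, skip ord("V")=86, substring test, set add
def get_variables_letters (statement : String) : PySem.Set String :=
  (PySem.List.pyRange 65 90 1).foldl
    (fun letters i =>
      if i = 86 then letters
      else if PySem.Str.isIn (chrStr i) statement then PySem.Set.add letters (chrStr i)
      else letters)
    PySem.Set.empty

def truth_table_rows (statement : String) : List (List String) :=
  let variablesL := get_variables_letters statement
  let total_variables : Int := PySem.Set.len variablesL
  let total_rows : Int := (2 : Int) ^ total_variables.toNat  -- 2**total_variables (total_variables ≥ 0)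
  let variable_row : List String := PySem.List.sorted variablesL (fun v => v) false
  -- Python's mutable rows list is ported as Array (same traversal, O(1) index update)
  let rows : Array (List String) :=
    (PySem.List.pyRange 0 total_rows 1).foldl (fun rows _ => rows.push []) #[]
  let rows :=
    (PySem.List.pyRange 1 (total_variables + 1) 1).foldl
      (fun rows i =>
        let parts : Int := (2 : Int) ^ i.toNat              -- 2**i (i ≥ 1 here)
        let part_len : Int := PySem.Int.floordiv total_rows parts
        let st :=
          (PySem.List.pyRange 0 parts 1).foldl
            (fun st _j =>
              let inner :=
                (PySem.List.pyRange 0 part_len 1).foldl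
                  (fun p _ =>
                    -- rows[index].append("F"/"T"); index += 1 (index stays in range throughout)
                    (p.1.modify p.2.toNat (fun row => row ++ [if st.2.2 then "F" else "T"]),
                     p.2 + 1))
                  (st.1, st.2.1)
              (inner.1, inner.2, !st.2.2))
            (rows, (0 : Int), false)
        st.1)
      rows
  PySem.List.insert rows.toList 0 variable_row

-- ===== PORT B =====

def truth_table_rows_alt (statement : String) : List (List String) :=
  let variablesL := get_variables_letters statement
  let n : Int := PySem.Set.len variablesL
  let variable_row : List String := PySem.List.sorted variablesL (fun v => v) false
  -- rows list built by append is ported as Array push (same order)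
  ((PySem.List.pyRange 0 ((2 : Int) ^ n.toNat) 1).foldl
    (fun rows r =>
      rows.push ((PySem.List.pyRange 0 n 1).map (fun k =>
        if PySem.Int.mod (PySem.Int.floordiv r ((2 : Int) ^ (n - 1 - k).toNat)) 2 = 0
        then "T" else "F")))
    #[variable_row]).toList

-- ===== PRECONDITION & SPEC =====
def Spec_truth_table_rows (statement : String) (out : List (List String)) : Prop := out = truth_table_rows_alt statement
instance (statement : String) (out : List (List String)) : Decidable (Spec_truth_table_rows statement out) := by unfold Spec_truth_table_rows; infer_instance

-- ===== CLAIM (what is proved, stated in full; the proofs are below) =====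
def Claim_equal_truth_table_rows : Prop := ∀ (statement : String), Dom_truth_table_rows statement → Spec_truth_table_rows statement (truth_table_rows statement)

-- ===== LEMMAS AND PROOFS =====

def pvIStep (v : String) (p : List (List String) × Int) : List (List String) × Int :=
  (p.1.modify p.2.toNat (fun row => row ++ [v]), p.2 + 1)

lemma map_range_getElem! (l : List (List String)) :
    (List.range l.length).map (fun t => l[t]!) = l := by
  apply List.ext_getElem (by simp)
  intro i h1 h2
  simp only [List.getElem_map, List.getElem_range]
  exact getElem!_pos l i (by simpa using h2)

lemma pvIStep_iterate (v : String) :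
    ∀ (m : Nat) (rows : List (List String)) (a : Nat), a + m ≤ rows.length →
      (pvIStep v)^[m] (rows, (a : Int)) =
        ((List.range rows.length).map
            (fun t => if a ≤ t ∧ t < a + m then rows[t]! ++ [v] else rows[t]!),
          ((a + m : Nat) : Int)) := by
  intro m
  induction m with
  | zero =>
    intro rows a _
    simp only [Function.iterate_zero, id_eq, Nat.add_zero]
    refine Prod.ext ?_ rfl
    have : ∀ t ∈ List.range rows.length,
        (if a ≤ t ∧ t < a then rows[t]! ++ [v] else rows[t]!) = rows[t]! := by
      intro t _; rw [if_neg (by omega)]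
    rw [List.map_congr_left this, map_range_getElem!]
  | succ m ih =>
    intro rows a hle
    have ha : a < rows.length := by omega
    have hstep : pvIStep v (rows, (a : Int)) =
        (rows.modify a (fun row => row ++ [v]), ((a + 1 : Nat) : Int)) := by
      simp [pvIStep]
    rw [Function.iterate_succ_apply, hstep,
      ih (rows.modify a (fun row => row ++ [v])) (a + 1) (by simp; omega)]
    refine Prod.ext ?_ (by simp; ring)
    simp only [List.length_modify]
    apply List.ext_getElem (by simp)
    intro t h1 h2
    have ht : t < rows.length := by simpa using h1
    simp only [List.getElem_map, List.getElem_range]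
    have hmod : (rows.modify a (fun row => row ++ [v]))[t]! =
        if a = t then rows[t]! ++ [v] else rows[t]! := by
      rw [getElem!_pos _ t (by simpa using ht), getElem!_pos rows t ht,
        List.getElem_modify]
    rw [hmod]
    split_ifs <;> first | rfl | omega

def pvVal (b : Bool) : String := if b then "F" else "T"
def pvJStep (pl : Nat) (st : List (List String) × Int × Bool) : List (List String) × Int × Bool :=
  let inner := (pvIStep (pvVal st.2.2))^[pl] (st.1, st.2.1)
  (inner.1, inner.2, !st.2.2)

lemma pvJStep_iterate (pl : Nat) (hpl : 0 < pl) :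
    ∀ (P : Nat) (rows : List (List String)) (a : Nat) (sw : Bool), a + P * pl ≤ rows.length →
      (pvJStep pl)^[P] (rows, (a : Int), sw) =
        ((List.range rows.length).map
            (fun t => if a ≤ t ∧ t < a + P * pl
              then rows[t]! ++ [pvVal (xor sw (decide (((t - a) / pl) % 2 = 1)))]
              else rows[t]!),
          ((a + P * pl : Nat) : Int), xor sw (decide (P % 2 = 1))) := by
  intro P
  induction P with
  | zero =>
    intro rows a sw _
    simp only [Function.iterate_zero, id_eq, Nat.zero_mul, Nat.add_zero]
    refine Prod.ext ?_ (by simp)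
    have : ∀ t ∈ List.range rows.length,
        (if a ≤ t ∧ t < a then rows[t]! ++ [pvVal (xor sw (decide (((t - a) / pl) % 2 = 1)))]
          else rows[t]!) = rows[t]! := by
      intro t _; rw [if_neg (by omega)]
    rw [List.map_congr_left this, map_range_getElem!]
  | succ P ih =>
    intro rows a sw hle
    have hmul : (P + 1) * pl = P * pl + pl := by ring
    have keyb : ∀ (sw : Bool) (x : Nat),
        (!sw ^^ decide (x % 2 = 1)) = (sw ^^ decide ((x + 1) % 2 = 1)) := by
      intro sw x
      by_cases hp : x % 2 = 1
      · have h2 : (x + 1) % 2 = 0 := by omega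
        simp [hp, h2]
      · have h2 : (x + 1) % 2 = 1 := by omega
        simp [hp, h2]
    have hstep : pvJStep pl (rows, (a : Int), sw) =
        ((List.range rows.length).map
            (fun t => if a ≤ t ∧ t < a + pl then rows[t]! ++ [pvVal sw] else rows[t]!),
          ((a + pl : Nat) : Int), !sw) := by
      show ((_ : List (List String) × Int).1, _, !sw) = _
      rw [pvIStep_iterate (pvVal sw) pl rows a (by omega)]
    rw [Function.iterate_succ_apply, hstep]
    set rows1 : List (List String) := (List.range rows.length).map
        (fun t => if a ≤ t ∧ t < a + pl then rows[t]! ++ [pvVal sw] else rows[t]!) with hrows1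
    have hlen1 : rows1.length = rows.length := by simp [hrows1]
    have hAt1 : ∀ t, t < rows.length →
        rows1[t]! = if a ≤ t ∧ t < a + pl then rows[t]! ++ [pvVal sw] else rows[t]! := by
      intro t ht
      rw [getElem!_pos rows1 t (by omega)]
      simp [hrows1]
    rw [ih rows1 (a + pl) (!sw) (by omega)]
    refine Prod.ext ?_ (Prod.ext (by simp; ring) (keyb sw P))
    · simp only [hlen1]
      apply List.ext_getElem (by simp)
      intro t h1 h2
      have ht : t < rows.length := by simpa using h1
      simp only [List.getElem_map, List.getElem_range]
      rw [hAt1 t ht]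
      by_cases hc1 : a ≤ t ∧ t < a + pl
      · rw [if_neg (by omega), if_pos hc1, if_pos (by omega)]
        have h0 : (t - a) / pl = 0 := Nat.div_eq_of_lt (by omega)
        simp [h0]
      · by_cases hc2 : a + pl ≤ t ∧ t < a + pl + P * pl
        · rw [if_pos hc2, if_neg hc1, if_pos (by omega)]
          have hdiv : (t - a) / pl = (t - (a + pl)) / pl + 1 := by
            have h3 : t - a = (t - (a + pl)) + pl := by omega
            rw [h3, Nat.add_div_right _ hpl]
          rw [hdiv, keyb sw]
        · rw [if_neg hc2, if_neg hc1, if_neg (by omega)]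


lemma push_iterate_toList {α : Type} (x : α) :
    ∀ (m : Nat) (a : Array α), ((fun a : Array α => a.push x)^[m] a).toList = a.toList ++ List.replicate m x := by
  intro m
  induction m with
  | zero => simp
  | succ m ih =>
    intro a
    rw [Function.iterate_succ_apply, ih, Array.toList_push]
    simp [List.replicate_succ]

lemma push_fold_toList {α β : Type} (f : α → β) :
    ∀ (l : List α) (a : Array β),
      (l.foldl (fun acc y => acc.push (f y)) a).toList = a.toList ++ l.map f := by
  intro l
  induction l with
  | nil => simp
  | cons x xs ih =>
    intro a
    rw [List.foldl_cons, ih, Array.toList_push]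
    simp

def pvIStepA (v : String) (p : Array (List String) × Int) : Array (List String) × Int :=
  (p.1.modify p.2.toNat (fun row => row ++ [v]), p.2 + 1)

def pvJStepA (pl : Nat) (st : Array (List String) × Int × Bool) : Array (List String) × Int × Bool :=
  let inner := (pvIStepA (pvVal st.2.2))^[pl] (st.1, st.2.1)
  (inner.1, inner.2, !st.2.2)

lemma pvIStepA_iter_toList (v : String) :
    ∀ (m : Nat) (p : Array (List String) × Int),
      ((((pvIStepA v)^[m] p).1.toList, ((pvIStepA v)^[m] p).2) : List (List String) × Int)
        = (pvIStep v)^[m] (p.1.toList, p.2) := by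
  intro m
  induction m with
  | zero => intro p; rfl
  | succ m ih =>
    intro p
    rw [Function.iterate_succ_apply, Function.iterate_succ_apply,
      show pvIStep v (p.1.toList, p.2) = ((pvIStepA v p).1.toList, (pvIStepA v p).2) by
        simp [pvIStep, pvIStepA, Array.toList_modify]]
    exact ih (pvIStepA v p)

lemma pvJStepA_iter_toList (pl : Nat) :
    ∀ (P : Nat) (st : Array (List String) × Int × Bool),
      ((((pvJStepA pl)^[P] st).1.toList, ((pvJStepA pl)^[P] st).2.1, ((pvJStepA pl)^[P] st).2.2)
          : List (List String) × Int × Bool)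
        = (pvJStep pl)^[P] (st.1.toList, st.2.1, st.2.2) := by
  have hstep : ∀ (st : Array (List String) × Int × Bool),
      pvJStep pl (st.1.toList, st.2.1, st.2.2)
        = ((pvJStepA pl st).1.toList, (pvJStepA pl st).2.1, (pvJStepA pl st).2.2) := by
    intro st
    have h := pvIStepA_iter_toList (pvVal st.2.2) pl (st.1, st.2.1)
    exact Prod.ext (congrArg Prod.fst h).symm (Prod.ext (congrArg Prod.snd h).symm rfl)
  intro P
  induction P with
  | zero => intro st; rfl
  | succ P ih =>
    intro st
    rw [Function.iterate_succ_apply, Function.iterate_succ_apply, hstep st]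
    exact ih (pvJStepA pl st)

def pvCell (n r k : Nat) : String := if (r / 2 ^ (n - 1 - k)) % 2 = 1 then "F" else "T"
def pvTbl (n m : Nat) : List (List String) :=
  (List.range (2 ^ n)).map (fun r => (List.range m).map (pvCell n r))

lemma pvTbl_length (n m : Nat) : (pvTbl n m).length = 2 ^ n := by simp [pvTbl]

lemma pvTbl_getElem! (n m t : Nat) (ht : t < 2 ^ n) :
    (pvTbl n m)[t]! = (List.range m).map (pvCell n t) := by
  rw [getElem!_pos _ t (by simpa [pvTbl_length] using ht)]
  simp [pvTbl]

lemma pvColumn (n m : Nat) (hm : m < n) :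
    ((pvJStep (2 ^ (n - m - 1)))^[2 ^ (m + 1)] (pvTbl n m, (0 : Int), false)).1 = pvTbl n (m + 1) := by
  have hpl : 0 < 2 ^ (n - m - 1) := Nat.two_pow_pos _
  have hmul : 2 ^ (m + 1) * 2 ^ (n - m - 1) = 2 ^ n := by
    rw [← pow_add]; congr 1; omega
  have h := pvJStep_iterate (2 ^ (n - m - 1)) hpl (2 ^ (m + 1)) (pvTbl n m) 0 false
    (by rw [pvTbl_length]; omega)
  rw [show ((0 : Nat) : Int) = (0 : Int) by simp] at h
  rw [h]
  simp only [pvTbl_length]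
  apply List.ext_getElem (by simp [pvTbl_length])
  intro t h1 h2
  have ht : t < 2 ^ n := by simpa using h1
  simp only [List.getElem_map, List.getElem_range]
  rw [if_pos (by omega), pvTbl_getElem! n m t ht]
  have htbl : (pvTbl n (m + 1))[t] = (List.range (m + 1)).map (pvCell n t) := by
    have := pvTbl_getElem! n (m + 1) t ht
    rwa [getElem!_pos _ t (by simpa [pvTbl_length] using ht)] at this
  rw [htbl, List.range_succ, List.map_append, List.map_singleton]
  congr 1
  simp only [Nat.sub_zero]
  have he : n - m - 1 = n - 1 - m := by omega
  unfold pvCell pvVal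
  rw [he]
  by_cases hp : (t / 2 ^ (n - 1 - m)) % 2 = 1 <;> simp [hp]

lemma pow_int_cast (e : Nat) : ((2 : Int) ^ e) = ((2 ^ e : Nat) : Int) := by push_cast; ring

lemma foldl_ignore {α β : Type} (f : β → β) (l : List α) (s : β) :
    l.foldl (fun s _ => f s) s = f^[l.length] s := by
  induction l generalizing s with
  | nil => rfl
  | cons x xs ih => simpa [Function.iterate_succ_apply] using ih (f s)

lemma pvB_eq (nn : Nat) (vrow : List String) :
    ((PySem.List.pyRange 0 ((2 : Int) ^ nn) 1).foldl
      (fun rows r =>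
        rows.push ((PySem.List.pyRange 0 (nn : Int) 1).map (fun k =>
          if PySem.Int.mod (PySem.Int.floordiv r ((2 : Int) ^ (((nn : Int)) - 1 - k).toNat)) 2 = 0
          then "T" else "F")))
      #[vrow]).toList = vrow :: pvTbl nn nn := by
  rw [push_fold_toList (fun r => (PySem.List.pyRange 0 (nn : Int) 1).map (fun k =>
      if PySem.Int.mod (PySem.Int.floordiv r ((2 : Int) ^ (((nn : Int)) - 1 - k).toNat)) 2 = 0
      then "T" else "F"))]
  show vrow :: _ = _
  congr 1
  rw [PySem.List.pyRange_one 0 ((2 : Int) ^ nn), List.map_map, pvTbl]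
  rw [show ((2 : Int) ^ nn - 0).toNat = 2 ^ nn by rw [sub_zero]; exact_mod_cast rfl]
  apply List.map_congr_left
  intro r hr
  simp only [Function.comp_apply, Int.zero_add]
  rw [PySem.List.pyRange_one 0 (nn : Int), List.map_map]
  rw [show ((nn : Int) - 0).toNat = nn by simp]
  apply List.map_congr_left
  intro k hk
  have hk' : k < nn := List.mem_range.mp hk
  simp only [Function.comp_apply, Int.zero_add]
  rw [show (((nn : Int)) - 1 - (k : Int)).toNat = nn - 1 - k by omega]
  rw [pow_int_cast, PySem.Int.floordiv_natCast, show (2 : Int) = ((2 : Nat) : Int) from rfl, PySem.Int.mod_natCast]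
  unfold pvCell
  by_cases hp : (r / 2 ^ (nn - 1 - k)) % 2 = 1
  · rw [if_neg (by omega), if_pos hp]
  · rw [if_pos (by omega), if_neg hp]

lemma pvTbl_zero (nn : Nat) : pvTbl nn 0 = List.replicate (2 ^ nn) [] := by
  simp [pvTbl]

lemma pvStep_eq (nn m : Nat) (hm : m < nn) :
    ((PySem.List.pyRange 0 (PySem.Int.floordiv ((2 : Int) ^ nn) ((2 : Int) ^ (1 + (m : Int)).toNat)) 1).length)
      = 2 ^ (nn - m - 1) := by
  rw [show (1 + (m : Int)).toNat = m + 1 by omega]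
  rw [pow_int_cast nn, pow_int_cast (m + 1), PySem.Int.floordiv_natCast,
    Nat.pow_div (by omega) (by omega), PySem.List.length_pyRange_one,
    show nn - (m + 1) = nn - m - 1 by omega]
  rw [sub_zero]; exact_mod_cast rfl

lemma pvA_eq (nn : Nat) :
    ((PySem.List.pyRange 1 ((nn : Int) + 1) 1).foldl
      (fun rows i =>
        ((PySem.List.pyRange 0 ((2 : Int) ^ i.toNat) 1).foldl
          (fun st _j =>
          (((PySem.List.pyRange 0 (PySem.Int.floordiv ((2 : Int) ^ nn) ((2 : Int) ^ i.toNat)) 1).foldl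
            (fun p _ => (p.1.modify p.2.toNat (fun row => row ++ [if st.2.2 then "F" else "T"]), p.2 + 1))
            (st.1, st.2.1)).1,
           ((PySem.List.pyRange 0 (PySem.Int.floordiv ((2 : Int) ^ nn) ((2 : Int) ^ i.toNat)) 1).foldl
            (fun p _ => (p.1.modify p.2.toNat (fun row => row ++ [if st.2.2 then "F" else "T"]), p.2 + 1))
            (st.1, st.2.1)).2,
           !st.2.2))
          (rows, (0 : Int), false)).1)
      ((PySem.List.pyRange 0 ((2 : Int) ^ nn) 1).foldl (fun rows _ => rows.push []) #[])).toList
      = pvTbl nn nn := by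
  have hinit : (((PySem.List.pyRange 0 ((2 : Int) ^ nn) 1).foldl
      (fun rows _ => rows.push []) (#[] : Array (List String)))).toList = pvTbl nn 0 := by
    rw [foldl_ignore (fun a : Array (List String) => a.push []), push_iterate_toList,
      PySem.List.length_pyRange_one,
      show ((2 : Int) ^ nn - 0).toNat = 2 ^ nn by rw [sub_zero]; exact_mod_cast rfl,
      pvTbl_zero]
    simp
  rw [PySem.List.pyRange_one 1 ((nn : Int) + 1),
    show ((nn : Int) + 1 - 1).toNat = nn by omega, List.foldl_map]
  have key : ∀ m, m ≤ nn → ∀ (a : Array (List String)), a.toList = pvTbl nn 0 →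
      ((List.range m).foldl
        (fun (rows : Array (List String)) (k : Nat) =>
          ((PySem.List.pyRange 0 ((2 : Int) ^ (1 + (k : Int)).toNat) 1).foldl
          (fun st _j =>
          (((PySem.List.pyRange 0 (PySem.Int.floordiv ((2 : Int) ^ nn) ((2 : Int) ^ (1 + (k : Int)).toNat)) 1).foldl
            (fun p _ => (p.1.modify p.2.toNat (fun row => row ++ [if st.2.2 then "F" else "T"]), p.2 + 1))
            (st.1, st.2.1)).1,
           ((PySem.List.pyRange 0 (PySem.Int.floordiv ((2 : Int) ^ nn) ((2 : Int) ^ (1 + (k : Int)).toNat)) 1).foldl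
            (fun p _ => (p.1.modify p.2.toNat (fun row => row ++ [if st.2.2 then "F" else "T"]), p.2 + 1))
            (st.1, st.2.1)).2,
           !st.2.2))
          (rows, (0 : Int), false)).1)
        a).toList = pvTbl nn m := by
    intro m
    induction m with
    | zero => intro _ a ha; simpa using ha
    | succ m ih =>
      intro hm a ha
      rw [List.range_succ, List.foldl_append, List.foldl_cons, List.foldl_nil]
      -- one column pass, on the array state
      have hj : ∀ (st : Array (List String) × Int × Bool),
          (PySem.List.pyRange 0 (PySem.Int.floordiv ((2 : Int) ^ nn) ((2 : Int) ^ (1 + (m : Int)).toNat)) 1).foldl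
              (fun p _ =>
                (p.1.modify p.2.toNat (fun row => row ++ [if st.2.2 then "F" else "T"]),
                 p.2 + 1))
              (st.1, st.2.1)
            = (pvIStepA (pvVal st.2.2))^[2 ^ (nn - m - 1)] (st.1, st.2.1) := by
        intro st
        rw [foldl_ignore
          (fun p : Array (List String) × Int =>
            (p.1.modify p.2.toNat (fun row => row ++ [if st.2.2 then "F" else "T"]), p.2 + 1)),
          pvStep_eq nn m (by omega)]
        rfl
      have hjs : (fun (st : Array (List String) × Int × Bool) (_j : Int) =>
          (((PySem.List.pyRange 0 (PySem.Int.floordiv ((2 : Int) ^ nn) ((2 : Int) ^ (1 + (m : Int)).toNat)) 1).foldl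
            (fun p _ => (p.1.modify p.2.toNat (fun row => row ++ [if st.2.2 then "F" else "T"]), p.2 + 1))
            (st.1, st.2.1)).1,
           ((PySem.List.pyRange 0 (PySem.Int.floordiv ((2 : Int) ^ nn) ((2 : Int) ^ (1 + (m : Int)).toNat)) 1).foldl
            (fun p _ => (p.1.modify p.2.toNat (fun row => row ++ [if st.2.2 then "F" else "T"]), p.2 + 1))
            (st.1, st.2.1)).2,
           !st.2.2))
          = fun st _j => pvJStepA (2 ^ (nn - m - 1)) st := by
        funext st _j
        rw [hj st]
        rfl
      rw [hjs, foldl_ignore (pvJStepA (2 ^ (nn - m - 1))), PySem.List.length_pyRange_one,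
        show ((2 : Int) ^ (1 + (m : Int)).toNat - 0).toNat = 2 ^ (m + 1) by
          rw [show (1 + (m : Int)).toNat = m + 1 by omega, sub_zero]; exact_mod_cast rfl]
      set arr := (List.range m).foldl
        (fun (rows : Array (List String)) (k : Nat) =>
          ((PySem.List.pyRange 0 ((2 : Int) ^ (1 + (k : Int)).toNat) 1).foldl
          (fun st _j =>
          (((PySem.List.pyRange 0 (PySem.Int.floordiv ((2 : Int) ^ nn) ((2 : Int) ^ (1 + (k : Int)).toNat)) 1).foldl
            (fun p _ => (p.1.modify p.2.toNat (fun row => row ++ [if st.2.2 then "F" else "T"]), p.2 + 1))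
            (st.1, st.2.1)).1,
           ((PySem.List.pyRange 0 (PySem.Int.floordiv ((2 : Int) ^ nn) ((2 : Int) ^ (1 + (k : Int)).toNat)) 1).foldl
            (fun p _ => (p.1.modify p.2.toNat (fun row => row ++ [if st.2.2 then "F" else "T"]), p.2 + 1))
            (st.1, st.2.1)).2,
           !st.2.2))
          (rows, (0 : Int), false)).1)
        a with harr
      have hcomm : ((pvJStepA (2 ^ (nn - m - 1)))^[2 ^ (m + 1)] (arr, (0 : Int), false)).1.toList
          = ((pvJStep (2 ^ (nn - m - 1)))^[2 ^ (m + 1)] (arr.toList, (0 : Int), false)).1 :=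
        congrArg Prod.fst
          (pvJStepA_iter_toList (2 ^ (nn - m - 1)) (2 ^ (m + 1)) (arr, (0 : Int), false))
      show ((pvJStepA (2 ^ (nn - m - 1)))^[2 ^ (m + 1)] (arr, (0 : Int), false)).1.toList = _
      rw [hcomm]
      have hlist : arr.toList = pvTbl nn m := ih (by omega) a ha
      rw [hlist]
      exact pvColumn nn m (by omega)
  exact key nn le_rfl _ hinit

lemma pvInsert_zero {x : List String} {xs : List (List String)} :
    PySem.List.insert xs 0 x = x :: xs := by
  simp [PySem.List.insert, PySem.List.sliceIndices]

lemma main_eq (statement : String) :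
    truth_table_rows statement = truth_table_rows_alt statement := by
  refine Eq.trans
    (congrArg
      (fun l => PySem.List.insert l 0
        (PySem.List.sorted (get_variables_letters statement) (fun v => v) false))
      (pvA_eq (get_variables_letters statement).length) : _) ?_
  rw [pvInsert_zero]
  exact (pvB_eq (get_variables_letters statement).length
    (PySem.List.sorted (get_variables_letters statement) (fun v => v) false)).symm

-- ===== VERDICT (by name: the statement is the Claim_ definition above) =====
theorem truth_table_rows_spec : Claim_equal_truth_table_rows := by
  intro statement _
  exact main_eq statement
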